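-- pv_equiv track=rewrite | github.com/AzizHax/PR_RAG_LLM_Agents | src/Agent1EXTRACTION.py | split_by_patients
-- ===== SOURCE A (Python) =====
-- from typing import List, Dict, Any, Tuple, Optional
--
-- def split_by_patients(corpus: str) -> List[Tuple[str, str]]:
--     """Split corpus by PATIENT_ID markers"""
--     patient_blocks = []
--     current_patient = None
--     current_text = []
--
--     for line in corpus.split('\n'):
--         if line.startswith('PATIENT_ID:'):
--             if current_patient and current_text:
--                 patient_blocks.append((current_patient, '\n'.join(current_text)))
--             current_patient = line.split(':', 1)[1].strip()
--             current_text = []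
--         else:
--             current_text.append(line)
--
--     if current_patient and current_text:
--         patient_blocks.append((current_patient, '\n'.join(current_text)))
--
--     return patient_blocks
-- ===== SOURCE B (Python) =====
-- def _leading_text(lines):
--     """Lines up to (not including) the next PATIENT_ID marker."""
--     text = []
--     for line in lines:
--         if line.startswith('PATIENT_ID:'):
--             break
--         text.append(line)
--     return text
--
--
-- def split_by_patients(corpus: str):
--     """Split corpus by PATIENT_ID markers"""
--     lines = corpus.split('\n')
--     # discard everything before the first marker
--     while lines and not lines[0].startswith('PATIENT_ID:'):
--         lines = lines[1:]
--     blocks = []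
--     while lines:
--         head, rest = lines[0], lines[1:]
--         text = _leading_text(rest)
--         patient = head.split(':', 1)[1].strip()
--         if patient and text:
--             blocks.append((patient, '\n'.join(text)))
--         lines = rest[len(text):]
--     return blocks
-- ===== Notes on version B (the rewrite author's own statement) =====
-- stated objective: alternative
-- what changed: Replaces A's single-pass accumulator (current_patient/current_text carried across iterations plus a duplicated final flush) by a stateless block-at-a-time decomposition: drop the pre-marker prefix, then repeatedly take one marker line and the run of text lines up to the next marker and emit that block.
import Mathlib
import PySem

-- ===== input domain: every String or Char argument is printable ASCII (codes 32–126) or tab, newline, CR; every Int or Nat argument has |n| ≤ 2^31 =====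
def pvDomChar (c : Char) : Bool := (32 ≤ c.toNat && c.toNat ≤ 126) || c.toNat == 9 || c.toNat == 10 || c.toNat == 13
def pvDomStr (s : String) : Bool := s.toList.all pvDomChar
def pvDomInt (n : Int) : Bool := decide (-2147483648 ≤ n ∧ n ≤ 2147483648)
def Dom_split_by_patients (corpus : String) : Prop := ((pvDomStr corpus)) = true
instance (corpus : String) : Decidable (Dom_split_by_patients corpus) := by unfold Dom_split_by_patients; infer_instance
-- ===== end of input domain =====

-- B replaces A's carried accumulator state (current_patient/current_text + duplicated final flush)
-- by a stateless block-at-a-time decomposition; equally fast, proved to return the same list.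


-- ===== PORT A =====
-- shared by both ports (both Pythons contain these very expressions)
def pvIsMarker (line : String) : Bool := PySem.Str.startswith line "PATIENT_ID:"

-- line.split(':', 1)[1].strip(); the [1] index exists on every marker line (it contains ':')
def pvMarkerId (line : String) : String :=
  PySem.Str.strip (((PySem.Str.splitMax? line ":" 1).getD []).getD 1 "")

-- 'if current_patient and current_text: patient_blocks.append(…)' as a 0/1-element list
def pvFlush (cur : Option String) (txt : List String) : List (String × String) :=
  match cur with
  | none => []
  | some p => if p ≠ "" ∧ txt ≠ [] then [(p, PySem.Str.join "\n" txt)] else []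

-- the body of A's for-loop; state = (current_patient, current_text, patient_blocks)
def pvAstep (st : Option String × List String × List (String × String)) (line : String) :
    Option String × List String × List (String × String) :=
  let (cur, txt, acc) := st
  if pvIsMarker line then (some (pvMarkerId line), [], acc ++ pvFlush cur txt)
  else (cur, txt ++ [line], acc)

def split_by_patients (corpus : String) : List (String × String) :=
  let st := ((PySem.Str.split? corpus "\n").getD []).foldl pvAstep (none, [], [])
  st.2.2 ++ pvFlush st.1 st.2.1

-- ===== PORT B =====
-- B's first while loop: discard lines before the first marker
def pvDropPre : List String → List String
  | [] => []
  | l :: ls => if pvIsMarker l then l :: ls else pvDropPre ls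

-- _leading_text: lines up to (not including) the next marker
def pvLeadingText : List String → List String
  | [] => []
  | l :: ls => if pvIsMarker l then [] else l :: pvLeadingText ls

-- B's main while loop: one block per iteration, no carried state
def pvBlocks : List String → List (String × String)
  | [] => []
  | head :: rest =>
    let text := pvLeadingText rest
    let pid := pvMarkerId head
    (if pid ≠ "" ∧ text ≠ [] then [(pid, PySem.Str.join "\n" text)] else [])
      ++ pvBlocks (rest.drop text.length)
  termination_by ls => ls.length
  decreasing_by simp

def split_by_patients_alt (corpus : String) : List (String × String) :=
  pvBlocks (pvDropPre ((PySem.Str.split? corpus "\n").getD []))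

-- ===== PRECONDITION & SPEC =====
def Spec_split_by_patients (corpus : String) (out : List (String × String)) : Prop := out = split_by_patients_alt corpus
instance (corpus : String) (out : List (String × String)) : Decidable (Spec_split_by_patients corpus out) := by unfold Spec_split_by_patients; infer_instance

-- ===== CLAIM (what is proved, stated in full; the proofs are below) =====
def Claim_equal_split_by_patients : Prop := ∀ (corpus : String), Dom_split_by_patients corpus → Spec_split_by_patients corpus (split_by_patients corpus)

-- ===== LEMMAS AND PROOFS =====
-- equation lemmas for the well-founded pvBlocks
theorem pvBlocks_nil : pvBlocks [] = [] := by rw [pvBlocks]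

theorem pvBlocks_cons (head : String) (rest : List String) :
    pvBlocks (head :: rest) =
      (if pvMarkerId head ≠ "" ∧ pvLeadingText rest ≠ [] then
        [(pvMarkerId head, PySem.Str.join "\n" (pvLeadingText rest))] else [])
      ++ pvBlocks (rest.drop (pvLeadingText rest).length) := by
  rw [pvBlocks]

-- recursive restatement of A's fold (proof helper only)
def pvRunA : List String → Option String → List String → List (String × String)
  | [], cur, txt => pvFlush cur txt
  | l :: ls, cur, txt =>
    if pvIsMarker l then pvFlush cur txt ++ pvRunA ls (some (pvMarkerId l)) []
    else pvRunA ls cur (txt ++ [l])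

theorem pvFoldA_eq_runA (ls : List String) : ∀ (cur : Option String) (txt : List String)
    (acc : List (String × String)),
    (ls.foldl pvAstep (cur, txt, acc)).2.2 ++
      pvFlush (ls.foldl pvAstep (cur, txt, acc)).1 (ls.foldl pvAstep (cur, txt, acc)).2.1
    = acc ++ pvRunA ls cur txt := by
  induction ls with
  | nil => intro cur txt acc; simp [pvRunA]
  | cons l ls ih =>
    intro cur txt acc
    by_cases h : pvIsMarker l = true
    · simp [List.foldl_cons, pvAstep, h, pvRunA, ih, List.append_assoc]
    · simp [List.foldl_cons, pvAstep, h, pvRunA, ih]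

theorem pvRunA_some (ls : List String) : ∀ (p : String) (txt : List String),
    pvRunA ls (some p) txt =
      (if p ≠ "" ∧ (txt ++ pvLeadingText ls) ≠ [] then
        [(p, PySem.Str.join "\n" (txt ++ pvLeadingText ls))] else [])
      ++ pvBlocks (ls.drop (pvLeadingText ls).length) := by
  induction ls with
  | nil => intro p txt; simp [pvRunA, pvLeadingText, pvBlocks_nil, pvFlush]
  | cons l ls ih =>
    intro p txt
    by_cases h : pvIsMarker l = true
    · simp only [pvRunA, h, if_pos, pvLeadingText, List.length_nil, List.drop_zero]
      rw [ih (pvMarkerId l) []]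
      simp [pvFlush, pvBlocks_cons]
    · simp only [pvRunA, h, pvLeadingText, if_neg, Bool.false_eq_true, not_false_iff]
      rw [ih p (txt ++ [l])]
      simp

theorem pvRunA_none (ls : List String) : ∀ (txt : List String),
    pvRunA ls none txt = pvBlocks (pvDropPre ls) := by
  induction ls with
  | nil => intro txt; simp [pvRunA, pvFlush, pvDropPre, pvBlocks_nil]
  | cons l ls ih =>
    intro txt
    by_cases h : pvIsMarker l = true
    · simp only [pvRunA, h, if_true, pvDropPre, pvFlush, List.nil_append]
      rw [pvRunA_some ls (pvMarkerId l) [], pvBlocks_cons]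
      simp
    · simp [pvRunA, h, pvDropPre, ih]

-- ===== VERDICT (by name: the statement is the Claim_ definition above) =====
theorem split_by_patients_spec : Claim_equal_split_by_patients := by
  intro corpus _
  unfold Spec_split_by_patients split_by_patients split_by_patients_alt
  simp only
  rw [pvFoldA_eq_runA, pvRunA_none]
  simp
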